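-- pv_equiv track=rewrite | github.com/bineficial/meta-interview | screening/python/count_friends.py | solution
-- ===== SOURCE A (Python) =====
-- def solution(data):
--     """if there is repeating data relationship"""
--     relat = {}
--     for pair in data:
--
--         if len(pair) == 2:
--             a = pair[0]
--             b = pair[1]
--
--             relat[a] = relat.get(a, set()) | {b}
--             relat[b] = relat.get(b, set()) | {a}
--         elif len(pair) == 1:
--             relat[pair[0]] = relat.get(pair[0], set()) | set()
--
--     solut = {k: len(v) for k, v in relat.items()}
--
--     return solut
-- ===== SOURCE B (Python) =====
-- def solution(data):
--     """if there is repeating data relationship"""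
--     # Pass 1: collect every node seen (insertion order) and a global set of directed edges.
--     nodes = []
--     seen = set()
--     edges = set()
--     for pair in data:
--         if len(pair) == 2:
--             a, b = pair
--             if a not in seen:
--                 seen.add(a)
--                 nodes.append(a)
--             if b not in seen:
--                 seen.add(b)
--                 nodes.append(b)
--             edges.add((a, b))
--             edges.add((b, a))
--         elif len(pair) == 1:
--             if pair[0] not in seen:
--                 seen.add(pair[0])
--                 nodes.append(pair[0])
--     # Pass 2: count distinct neighbors = outgoing directed edges per node.
--     counts = {n: 0 for n in nodes}
--     for a, _ in edges:
--         counts[a] += 1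
--     return counts
-- ===== Notes on version B (the rewrite author's own statement) =====
-- stated objective: alternative
-- what changed: A accumulates a per-node dict of neighbor sets and takes each set's size at the end; B makes one pass building a flat global set of directed edge tuples plus the ordered node list, then a second counting pass tallies the outgoing edges of each node.
import Mathlib
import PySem

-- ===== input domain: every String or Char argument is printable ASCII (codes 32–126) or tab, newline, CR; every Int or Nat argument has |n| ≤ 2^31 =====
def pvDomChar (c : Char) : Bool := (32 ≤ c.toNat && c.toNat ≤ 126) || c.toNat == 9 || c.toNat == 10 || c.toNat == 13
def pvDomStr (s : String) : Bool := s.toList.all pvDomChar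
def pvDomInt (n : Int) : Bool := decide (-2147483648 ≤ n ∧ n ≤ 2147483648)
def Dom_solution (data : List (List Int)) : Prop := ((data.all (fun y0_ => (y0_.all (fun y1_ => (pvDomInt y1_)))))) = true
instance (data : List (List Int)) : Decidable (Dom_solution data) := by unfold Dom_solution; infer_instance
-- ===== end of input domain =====

-- B replaces A's dict of per-node neighbor sets with a flat global set of directed edges plus a
-- separate counting pass over it (objective: alternative decomposition, same asymptotic cost).

-- ===== PORT A =====
-- loop body of A's 'for pair in data' loop (relat[x] = relat.get(x, set()) | ...)
def stepA (relat : PySem.Dict Int (PySem.Set Int)) (pair : List Int) : PySem.Dict Int (PySem.Set Int) :=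
  if pair.length == 2 then
    let a := PySem.List.pyGetD pair 0 0
    let b := PySem.List.pyGetD pair 1 0
    let relat2 := relat.insert a (PySem.Set.union (relat.getD a PySem.Set.empty) (PySem.Set.ofList [b]))
    relat2.insert b (PySem.Set.union (relat2.getD b PySem.Set.empty) (PySem.Set.ofList [a]))
  else if pair.length == 1 then
    relat.insert (PySem.List.pyGetD pair 0 0)
      (PySem.Set.union (relat.getD (PySem.List.pyGetD pair 0 0) PySem.Set.empty) PySem.Set.empty)
  else relat

def solution (data : List (List Int)) : List (Int × Int) :=
  let relat := data.foldl stepA PySem.Dict.empty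
  relat.items.map (fun kv => (kv.1, (kv.2.length : Int)))


-- ===== PORT B =====
-- loop body of B's first pass: (nodes seen so far, global set of directed edges)
def stepB (st : PySem.Set Int × PySem.Set (Int × Int)) (pair : List Int) :
    PySem.Set Int × PySem.Set (Int × Int) :=
  if pair.length == 2 then
    let a := PySem.List.pyGetD pair 0 0
    let b := PySem.List.pyGetD pair 1 0
    (PySem.Set.add (PySem.Set.add st.1 a) b,
     PySem.Set.add (PySem.Set.add st.2 (a, b)) (b, a))
  else if pair.length == 1 then
    (PySem.Set.add st.1 (PySem.List.pyGetD pair 0 0), st.2)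
  else st

def solution_alt (data : List (List Int)) : List (Int × Int) :=
  let st := data.foldl stepB (PySem.Set.empty, PySem.Set.empty)
  let counts : PySem.Dict Int Int := st.1.foldl (fun d n => d.insert n 0) PySem.Dict.empty
  (st.2.foldl (fun d p => d.modify p.1 0 (· + 1)) counts).items


-- ===== PRECONDITION & SPEC =====
def Spec_solution (data : List (List Int)) (out : List (Int × Int)) : Prop := out = solution_alt data
instance (data : List (List Int)) (out : List (Int × Int)) : Decidable (Spec_solution data out) := by unfold Spec_solution; infer_instance

-- ===== CLAIM (what is proved, stated in full; the proofs are below) =====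
def Claim_equal_solution : Prop := ∀ (data : List (List Int)), Dom_solution data → Spec_solution data (solution data)

-- ===== LEMMAS AND PROOFS =====
-- invariant tying A's dict of neighbor sets to B's (nodes, directed-edge set) state:
-- same keys in the same order, and A's neighbor set of n is exactly the second components of
-- the directed edges leaving n, in order.
def InvAB (relat : PySem.Dict Int (PySem.Set Int)) (nodes : PySem.Set Int)
    (edges : PySem.Set (Int × Int)) : Prop :=
  relat.keys = nodes ∧ nodes.Nodup ∧ (∀ p ∈ edges, p.1 ∈ nodes) ∧
  (∀ n : Int, (edges.filter (fun p => p.1 == n)).map (·.2) = relat.getD n ([] : PySem.Set Int))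
theorem set_add_of_mem {α : Type} [BEq α] [LawfulBEq α] (s : PySem.Set α) {x : α}
    (h : x ∈ s) : PySem.Set.add s x = s := by
  simp [PySem.Set.add, PySem.Set.contains, h]
theorem set_add_of_not_mem {α : Type} [BEq α] [LawfulBEq α] (s : PySem.Set α) {x : α}
    (h : ¬ x ∈ s) : PySem.Set.add s x = s ++ [x] := by
  simp [PySem.Set.add, PySem.Set.contains, h]
theorem keys_insert_eq_add {κ ν : Type} [BEq κ] [LawfulBEq κ] (d : PySem.Dict κ ν)
    (k : κ) (v : ν) : (d.insert k v).keys = PySem.Set.add d.keys k := by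
  by_cases h : k ∈ d.keys
  · rw [PySem.Dict.keys_insert_of_contains d v ((PySem.Dict.contains_iff_mem_keys d k).mpr h),
        set_add_of_mem _ h]
  · rw [PySem.Dict.keys_insert_of_not_contains d v
        (by simpa using (fun hc => h ((PySem.Dict.contains_iff_mem_keys d k).mp hc))),
        set_add_of_not_mem _ h]
theorem set_update_of_subset {α : Type} [BEq α] [LawfulBEq α] (l : List α) (s : PySem.Set α)
    (h : ∀ x ∈ l, x ∈ s) : PySem.Set.update s l = s := by
  induction l generalizing s with
  | nil => rfl
  | cons x t ih =>
      have hx : PySem.Set.add s x = s := set_add_of_mem s (h x (by simp))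
      show PySem.Set.update (PySem.Set.add s x) t = s
      rw [hx]; exact ih s (fun y hy => h y (by simp [hy]))

theorem mem_edges_iff {relat : PySem.Dict Int (PySem.Set Int)} {edges : PySem.Set (Int × Int)}
    (h4 : ∀ n : Int, (edges.filter (fun p => p.1 == n)).map (·.2) = relat.getD n ([] : PySem.Set Int))
    (x y : Int) : (x, y) ∈ edges ↔ y ∈ relat.getD x ([] : PySem.Set Int) := by
  rw [← h4 x]
  constructor
  · intro hm
    exact List.mem_map.mpr ⟨(x, y), List.mem_filter.mpr ⟨hm, by simp⟩, rfl⟩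
  · intro hm
    rcases List.mem_map.mp hm with ⟨p, hp, hp2⟩
    rcases List.mem_filter.mp hp with ⟨hpe, hp1⟩
    have h1 : p.1 = x := by simpa using hp1
    have : p = (x, y) := by cases p; simp_all
    rwa [this] at hpe

theorem inv_step (relat : PySem.Dict Int (PySem.Set Int)) (nodes : PySem.Set Int)
    (edges : PySem.Set (Int × Int)) (pair : List Int) (h : InvAB relat nodes edges) :
    InvAB (stepA relat pair) (stepB (nodes, edges) pair).1 (stepB (nodes, edges) pair).2 := by
  obtain ⟨h1, h2, h3, h4⟩ := h
  rcases pair with _ | ⟨a, _ | ⟨b, _ | ⟨c, r⟩⟩⟩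
  · exact ⟨h1, h2, h3, h4⟩
  · -- [a] : singleton
    show InvAB (relat.insert a (relat.getD a ([] : PySem.Set Int))) (PySem.Set.add nodes a) edges
    refine ⟨?_, PySem.Set.nodup_add nodes a h2, ?_, ?_⟩
    · rw [keys_insert_eq_add, h1]
    · intro p hp; exact (PySem.Set.mem_add nodes a p.1).mpr (Or.inl (h3 p hp))
    · intro n
      rw [PySem.Dict.getD_insert]
      split_ifs with hn
      · subst hn; exact h4 n
      · exact h4 n
  · -- [a, b] : edge
    show InvAB
      ((relat.insert a (PySem.Set.add (relat.getD a ([] : PySem.Set Int)) b)).insert b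
        (PySem.Set.add ((relat.insert a (PySem.Set.add (relat.getD a ([] : PySem.Set Int)) b)).getD b ([] : PySem.Set Int)) a))
      (PySem.Set.add (PySem.Set.add nodes a) b)
      (PySem.Set.add (PySem.Set.add edges (a, b)) (b, a))
    have hmem := mem_edges_iff h4
    by_cases hab : a = b
    · -- self loop
      rcases hab with rfl
      have hr1 : (relat.insert a (PySem.Set.add (relat.getD a ([] : PySem.Set Int)) a)).getD a ([] : PySem.Set Int)
          = PySem.Set.add (relat.getD a ([] : PySem.Set Int)) a :=
        PySem.Dict.getD_insert_self _ _ _ _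
      have haa : a ∈ PySem.Set.add (relat.getD a ([] : PySem.Set Int)) a :=
        (PySem.Set.mem_add _ a a).mpr (Or.inr rfl)
      have hrel : ((relat.insert a (PySem.Set.add (relat.getD a ([] : PySem.Set Int)) a)).insert a
          (PySem.Set.add ((relat.insert a (PySem.Set.add (relat.getD a ([] : PySem.Set Int)) a)).getD a ([] : PySem.Set Int)) a))
          = relat.insert a (PySem.Set.add (relat.getD a ([] : PySem.Set Int)) a) := by
        rw [hr1, set_add_of_mem _ haa, PySem.Dict.insert_insert_self]
      have hedge : PySem.Set.add (PySem.Set.add edges (a, a)) (a, a) = PySem.Set.add edges (a, a) :=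
        set_add_of_mem _ ((PySem.Set.mem_add edges (a,a) (a,a)).mpr (Or.inr rfl))
      have hnn : PySem.Set.add (PySem.Set.add nodes a) a = PySem.Set.add nodes a :=
        set_add_of_mem _ ((PySem.Set.mem_add nodes a a).mpr (Or.inr rfl))
      rw [hrel, hedge, hnn]
      refine ⟨?_, PySem.Set.nodup_add _ _ h2, ?_, ?_⟩
      · rw [keys_insert_eq_add, h1]
      · intro p hp
        rcases (PySem.Set.mem_add edges (a,a) p).mp hp with hp | hp
        · exact (PySem.Set.mem_add nodes a p.1).mpr (Or.inl (h3 p hp))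
        · rcases hp with rfl
          exact (PySem.Set.mem_add nodes a a).mpr (Or.inr rfl)
      · intro n
        rw [PySem.Dict.getD_insert]
        by_cases hme : (a, a) ∈ edges
        · rw [set_add_of_mem _ hme]
          split_ifs with hn
          · rw [h4 n, hn, set_add_of_mem _ ((hmem a a).mp hme)]
          · exact h4 n
        · rw [set_add_of_not_mem _ hme, List.filter_append, List.map_append, h4 n]
          split_ifs with hn
          · have hna : a ∉ relat.getD a ([] : PySem.Set Int) := fun hc => hme ((hmem a a).mpr hc)
            rw [hn, set_add_of_not_mem _ hna]
            simp
          · simp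
            omega
    · -- a ≠ b
      have hr1 : (relat.insert a (PySem.Set.add (relat.getD a ([] : PySem.Set Int)) b)).getD b ([] : PySem.Set Int)
          = relat.getD b ([] : PySem.Set Int) :=
        PySem.Dict.getD_insert_of_ne relat _ _ (Ne.symm hab)
      rw [hr1]
      refine ⟨?_, PySem.Set.nodup_add _ _ (PySem.Set.nodup_add _ _ h2), ?_, ?_⟩
      · rw [keys_insert_eq_add, keys_insert_eq_add, h1]
      · intro p hp
        rcases (PySem.Set.mem_add _ (b,a) p).mp hp with hp | hp
        · rcases (PySem.Set.mem_add _ (a,b) p).mp hp with hp | hp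
          · have := h3 p hp
            simp [PySem.Set.mem_add, this]
          · rcases hp with rfl
            simp [PySem.Set.mem_add]
        · rcases hp with rfl
          simp [PySem.Set.mem_add]
      · intro n
        have hnab : ((b, a) : Int × Int) ≠ (a, b) := fun hc => hab (congrArg Prod.snd hc)
        have e2 : PySem.Set.add (PySem.Set.add edges (a, b)) (b, a)
            = edges ++ ((if b ∈ relat.getD a ([] : PySem.Set Int) then [] else [(a, b)])
                ++ (if a ∈ relat.getD b ([] : PySem.Set Int) then [] else [(b, a)])) := by
          by_cases hb : b ∈ relat.getD a ([] : PySem.Set Int)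
          · rw [set_add_of_mem edges ((hmem a b).mpr hb)]
            by_cases ha : a ∈ relat.getD b ([] : PySem.Set Int)
            · rw [set_add_of_mem edges ((hmem b a).mpr ha)]; simp [hb, ha]
            · rw [set_add_of_not_mem edges (fun hc => ha ((hmem b a).mp hc))]; simp [hb, ha]
          · rw [set_add_of_not_mem edges (fun hc => hb ((hmem a b).mp hc))]
            by_cases ha : a ∈ relat.getD b ([] : PySem.Set Int)
            · rw [set_add_of_mem _ (List.mem_append.mpr (Or.inl ((hmem b a).mpr ha)))]
              simp [hb, ha]
            · rw [set_add_of_not_mem _ (fun hc => by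
                rcases List.mem_append.mp hc with hc | hc
                · exact ha ((hmem b a).mp hc)
                · exact hnab (by simpa using hc))]
              simp [hb, ha]
        rw [e2, List.filter_append, List.map_append, h4 n,
            PySem.Dict.getD_insert, PySem.Dict.getD_insert]
        by_cases hnb : n = b
        · rw [if_pos hnb]
          by_cases ha : a ∈ relat.getD b ([] : PySem.Set Int)
          · rw [set_add_of_mem _ ha]
            simp [hnb, ha]
            exact fun _ => hab
          · rw [set_add_of_not_mem _ ha]
            simp [hnb, ha, List.filter_append]
            exact fun _ h => hab h
        · rw [if_neg hnb]
          by_cases hna : n = a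
          · rw [if_pos hna]
            by_cases hb : b ∈ relat.getD a ([] : PySem.Set Int)
            · rw [set_add_of_mem _ hb]
              simp [hna, hb]
              exact fun _ h => hab h.symm
            · rw [set_add_of_not_mem _ hb]
              simp [hna, hb]
              exact fun _ h => hab h.symm
          · simp [List.filter_append, hna]
            exact ⟨fun _ h => hna h.symm, fun _ h => hnb h.symm⟩
  · -- length >= 3 : no-op
    have hA : stepA relat (a::b::c::r) = relat := by simp [stepA]
    have hB : stepB (nodes, edges) (a::b::c::r) = (nodes, edges) := by simp [stepB]
    rw [hA, hB]
    exact ⟨h1, h2, h3, h4⟩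


theorem inv_foldl (data : List (List Int)) (relat : PySem.Dict Int (PySem.Set Int))
    (nodes : PySem.Set Int) (edges : PySem.Set (Int × Int)) (h : InvAB relat nodes edges) :
    InvAB (data.foldl stepA relat) (data.foldl stepB (nodes, edges)).1
      (data.foldl stepB (nodes, edges)).2 := by
  induction data generalizing relat nodes edges with
  | nil => simpa using h
  | cons p t ih =>
      have hstep := inv_step relat nodes edges p h
      simpa using ih (stepA relat p) (stepB (nodes, edges) p).1 (stepB (nodes, edges) p).2 hstep

theorem solution_eq_alt (data : List (List Int)) : solution data = solution_alt data := by
  have hbase : InvAB PySem.Dict.empty PySem.Set.empty PySem.Set.empty :=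
    ⟨rfl, List.nodup_nil, by simp, fun n => rfl⟩
  obtain ⟨h1, h2, h3, h4⟩ := inv_foldl data PySem.Dict.empty PySem.Set.empty PySem.Set.empty hbase
  set relat := data.foldl stepA PySem.Dict.empty with hrel
  set st := data.foldl stepB (PySem.Set.empty, PySem.Set.empty) with hst
  have hkn : relat.keys.Nodup := h1 ▸ h2
  -- A side
  have hA : solution data = relat.keys.map (fun k => (k, ((relat.getD k ([] : PySem.Set Int)).length : Int))) := by
    show relat.items.map (fun kv => (kv.1, (kv.2.length : Int))) = _
    rw [PySem.Dict.items_eq_map_keys relat hkn ([] : PySem.Set Int), List.map_map]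
    rfl
  -- B side
  have hitems0 : (st.1.foldl (fun d n => d.insert n (0:Int)) PySem.Dict.empty).items
      = st.1.map (fun n => (n, (0:Int))) := by
    have := PySem.Dict.items_foldl_insert_fresh (l := st.1) (k := fun n => n)
      (v := fun _ => (0:Int)) (d := PySem.Dict.empty) (by intro a _; rfl) (by simpa using h2)
    simpa using this
  set counts0 : PySem.Dict Int Int := st.1.foldl (fun d n => d.insert n 0) PySem.Dict.empty with hc0
  have hkeys0 : counts0.keys = st.1 := by
    show counts0.items.map (·.1) = st.1
    rw [hitems0, List.map_map]
    have hcomp : ((·.1) ∘ fun n : Int => (n, (0:Int))) = id := rfl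
    rw [hcomp, List.map_id]
  have hgetD0 : ∀ n : Int, counts0.getD n 0 = 0 := by
    intro n
    by_cases hn : n ∈ st.1
    · exact PySem.Dict.getD_of_mem_items counts0
        (by rw [hitems0]; exact List.mem_map.mpr ⟨n, hn, rfl⟩) (hkeys0 ▸ h2) 0
    · exact PySem.Dict.getD_of_not_contains counts0 0
        (by
          by_contra hc
          exact hn (hkeys0 ▸ (PySem.Dict.contains_iff_mem_keys counts0 n).mp
            (by simpa using hc)))
  set counts : PySem.Dict Int Int := st.2.foldl (fun d p => d.modify p.1 0 (· + 1)) counts0 with hc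
  have hfold : counts = (st.2.map (·.1)).foldl (fun d x => d.modify x 0 (· + 1)) counts0 := by
    rw [List.foldl_map]
  have hkeys : counts.keys = st.1 := by
    rw [hc, PySem.Dict.keys_foldl_modify_key st.2 (fun p => p.1) 0 (fun _ _ => (· + 1)) counts0,
      hkeys0]
    exact set_update_of_subset _ _ (by
      intro x hx
      rcases List.mem_map.mp hx with ⟨p, hp, rfl⟩
      exact h3 p hp)
  have hgetD : ∀ n : Int, counts.getD n 0 = ((relat.getD n ([] : PySem.Set Int)).length : Int) := by
    intro n
    rw [hfold, PySem.Dict.getD_foldl_modify_add_one, hgetD0, zero_add]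
    have hcnt : List.count n (st.2.map (·.1)) = List.countP (fun p => p.1 == n) st.2 := by
      simp [List.count, List.countP_map]
      rfl
    rw [hcnt, List.countP_eq_length_filter, ← h4 n, List.length_map]
  have hB : solution_alt data = st.1.map (fun k => (k, counts.getD k 0)) := by
    show counts.items = _
    rw [PySem.Dict.items_eq_map_keys counts (hkeys ▸ h2) 0, hkeys]
  rw [hA, hB, h1]
  exact List.map_congr_left (fun k _ => by rw [hgetD k])

-- ===== VERDICT (by name: the statement is the Claim_ definition above) =====
theorem solution_spec : Claim_equal_solution := by
  intro data _
  unfold Spec_solution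
  exact solution_eq_alt data
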